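-- pv_equiv track=rewrite | github.com/anishs37/TJHSST-AI-1 | Unit 2/N-Queens/NQueens_IR.py | generate_random_state
-- ===== SOURCE A (Python) =====
-- def generate_random_state(size):
--     val = size // 2
--     matrix = [["0"]*size for i in range(size)]
--     iter = 0
--     iter2 = 0
--
--     for i in range(size):
--         matrix[i][iter] = '*'
--
--         if((size - iter) <= 2):
--             iter = 1
--
--         else:
--             iter = iter + 2
--
--     return matrix
-- ===== SOURCE B (Python) =====
-- def generate_random_state(size):
--     num_evens = (size + 1) // 2
--     return [['*' if j == (2 * i if i < num_evens else 2 * (i - num_evens) + 1) else '0'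
--              for j in range(size)]
--             for i in range(size)]
-- ===== Notes on version B (the rewrite author's own statement) =====
-- stated objective: simpler
-- what changed: B drops A's mutable matrix and threaded stride counter and builds each row independently in a single comprehension from a closed-form column index (the even columns for the first half of the rows, then the odd columns).
import Mathlib
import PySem

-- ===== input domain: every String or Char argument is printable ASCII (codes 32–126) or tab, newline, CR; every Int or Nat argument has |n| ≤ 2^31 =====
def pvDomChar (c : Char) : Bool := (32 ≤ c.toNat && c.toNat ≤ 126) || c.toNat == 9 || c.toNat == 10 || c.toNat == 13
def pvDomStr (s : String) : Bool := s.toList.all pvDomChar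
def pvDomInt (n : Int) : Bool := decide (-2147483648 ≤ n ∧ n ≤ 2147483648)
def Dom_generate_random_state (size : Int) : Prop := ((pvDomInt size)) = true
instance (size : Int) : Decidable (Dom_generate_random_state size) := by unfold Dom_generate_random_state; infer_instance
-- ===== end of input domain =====

-- B replaces A's stateful stride loop by a closed-form column index per row (simpler, single comprehension).

-- ===== PORT A =====
def generate_random_state (size : Int) : List (List String) :=
  let _val := PySem.Int.floordiv size 2
  let matrix := (PySem.List.pyRange 0 size 1).map (fun _ => List.replicate size.toNat "0")
  let r := (PySem.List.pyRange 0 size 1).foldl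
      (fun (st : List (List String) × Int) i =>
        -- matrix[i][iter] = '*': i and iter are nonnegative throughout, so .toNat is exact here
        let m := st.1.set i.toNat ((st.1.getD i.toNat []).set st.2.toNat "*")
        if size - st.2 ≤ 2 then (m, 1) else (m, st.2 + 2))
      (matrix, 0)
  r.1

-- ===== PORT B =====
def generate_random_state_alt (size : Int) : List (List String) :=
  let ne := PySem.Int.floordiv (size + 1) 2
  (PySem.List.pyRange 0 size 1).map (fun i =>
    (PySem.List.pyRange 0 size 1).map (fun j =>
      if j = (if i < ne then 2 * i else 2 * (i - ne) + 1) then "*" else "0"))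

-- ===== PRECONDITION & SPEC =====
def Spec_generate_random_state (size : Int) (out : List (List String)) : Prop := out = generate_random_state_alt size
instance (size : Int) (out : List (List String)) : Decidable (Spec_generate_random_state size out) := by unfold Spec_generate_random_state; infer_instance

-- ===== CLAIM (what is proved, stated in full; the proofs are below) =====
def Claim_equal_generate_random_state : Prop := ∀ (size : Int), Dom_generate_random_state size → Spec_generate_random_state size (generate_random_state size)

-- ===== LEMMAS AND PROOFS =====

/-- A's iter update. -/
def pvStep (size it : Int) : Int := if size - it ≤ 2 then 1 else it + 2

/-- iter value t steps after starting from `it`. -/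
def pvIterFrom (size : Int) : Int → Nat → Int
  | it, 0 => it
  | it, t + 1 => pvIterFrom size (pvStep size it) t

/-- closed-form column for row t (Nat world). -/
def pvCol (n t : Nat) : Nat := if t < (n + 1) / 2 then 2 * t else 2 * (t - (n + 1) / 2) + 1

theorem pvIterFrom_succ (size it : Int) (t : Nat) :
    pvIterFrom size it (t + 1) = pvStep size (pvIterFrom size it t) := by
  induction t generalizing it with
  | zero => rfl
  | succ t ih => exact ih (pvStep size it)

theorem pvIterFrom_closed (n : Nat) (t : Nat) (ht : t < n) :
    pvIterFrom (n : Int) 0 t = (pvCol n t : Int) := by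
  induction t with
  | zero =>
    simp only [pvIterFrom, pvCol]
    rw [if_pos (by omega)]
    simp
  | succ t ih =>
    rw [pvIterFrom_succ, ih (by omega)]
    simp only [pvStep, pvCol]
    split_ifs with h1 h2 h3 h4 h5 h6 h7 <;> push_cast at * <;> omega

theorem pvCol_lt (n t : Nat) (_ht : t < n) : pvCol n t < n := by
  unfold pvCol; split_ifs <;> omega

/-- the closed-form column of port B equals pvCol. -/
theorem pvColI_eq (n t : Nat) (_ht : t < n) :
    (if (t : Int) < PySem.Int.floordiv ((n : Int) + 1) 2 then 2 * (t : Int)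
     else 2 * ((t : Int) - PySem.Int.floordiv ((n : Int) + 1) 2) + 1) = (pvCol n t : Int) := by
  have hfd : PySem.Int.floordiv ((n : Int) + 1) 2 = (((n + 1) / 2 : Nat) : Int) := by
    rw [show ((n : Int) + 1) = ((n + 1 : Nat) : Int) by push_cast; ring]
    exact_mod_cast PySem.Int.floordiv_natCast (n + 1) 2
  rw [hfd]
  unfold pvCol
  split_ifs with h1 h2 h3 <;> push_cast at * <;> omega

/-- one row with a star at column c. -/
theorem pvRow_eq (n c : Nat) (_hc : c < n) :
    (List.replicate n "0").set c "*"
      = (List.range n).map (fun j : Nat => if (j : Int) = (c : Int) then "*" else "0") := by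
  apply List.ext_getElem
  · simp
  · intro j h1 h2
    rw [List.getElem_map, List.getElem_range, List.getElem_set, List.getElem_replicate]
    split_ifs with h1 h2 h3 <;> first | rfl | (exfalso; omega)

/-- the fold, characterized. -/
theorem pvFold_main (size : Int) (c : Nat) :
    ∀ (it : Int) (pre : List (List String)),
    ((List.range' pre.length c).foldl
      (fun (st : List (List String) × Int) (k : Nat) =>
        if size - st.2 ≤ 2 then (st.1.set k ((st.1.getD k []).set st.2.toNat "*"), 1)
        else (st.1.set k ((st.1.getD k []).set st.2.toNat "*"), st.2 + 2))
      (pre ++ List.replicate c (List.replicate size.toNat "0"), it)).1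
    = pre ++ (List.range c).map
        (fun t => (List.replicate size.toNat "0").set (pvIterFrom size it t).toNat "*") := by
  induction c with
  | zero => intro it pre; simp
  | succ c ih =>
    intro it pre
    rw [List.range'_succ, List.replicate_succ]
    have hset : (pre ++ List.replicate size.toNat "0" :: List.replicate c (List.replicate size.toNat "0")).set
        pre.length (((pre ++ List.replicate size.toNat "0" :: List.replicate c (List.replicate size.toNat "0")).getD pre.length []).set it.toNat "*")
        = (pre ++ [(List.replicate size.toNat "0").set it.toNat "*"]) ++ List.replicate c (List.replicate size.toNat "0") := by
      rw [List.getD_eq_getElem?_getD, List.getElem?_append_right (le_refl _)]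
      simp
    simp only [List.foldl_cons]
    split_ifs with h
    · have heq := ih 1 (pre ++ [(List.replicate size.toNat "0").set it.toNat "*"])
      simp only [List.length_append, List.length_cons, List.length_nil, Nat.zero_add] at heq ⊢
      simp only [hset]
      rw [heq, List.range_succ_eq_map]
      simp [List.map_map, Function.comp_def, pvIterFrom, pvStep, h]
    · have heq := ih (it + 2) (pre ++ [(List.replicate size.toNat "0").set it.toNat "*"])
      simp only [List.length_append, List.length_cons, List.length_nil, Nat.zero_add] at heq ⊢
      simp only [hset]
      rw [heq, List.range_succ_eq_map]
      simp [List.map_map, Function.comp_def, pvIterFrom, pvStep, h]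

-- ===== VERDICT (by name: the statement is the Claim_ definition above) =====
theorem generate_random_state_spec : Claim_equal_generate_random_state := by
  intro size _
  unfold Spec_generate_random_state generate_random_state generate_random_state_alt
  by_cases hs : size ≤ 0
  · rw [PySem.List.pyRange_one_eq_nil hs]; simp
  · rw [not_le] at hs
    obtain ⟨n, rfl⟩ : ∃ n : Nat, size = (n : Int) := ⟨size.toNat, (Int.toNat_of_nonneg (by omega)).symm⟩
    have hn : 0 < n := by exact_mod_cast hs
    rw [PySem.List.pyRange_one 0 (n : Int)]
    simp only [Int.sub_zero, Int.toNat_natCast, zero_add, List.foldl_map, List.map_map,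
      Function.comp_def, Int.toNat_natCast]
    have hrep : (List.range n).map (fun _ : Nat => List.replicate n "0")
        = List.replicate n (List.replicate n "0") := by
      rw [List.map_const']; simp
    rw [hrep]
    have hmain := pvFold_main (n : Int) n 0 ([] : List (List String))
    simp only [List.length_nil, List.nil_append, ← List.range_eq_range', Int.toNat_natCast] at hmain
    rw [hmain]
    apply List.map_congr_left
    intro t htm
    have ht : t < n := List.mem_range.mp htm
    rw [pvIterFrom_closed n t ht]
    simp only [Int.toNat_natCast]
    rw [pvRow_eq n (pvCol n t) (pvCol_lt n t ht)]
    apply List.map_congr_left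
    intro j hjm
    rw [pvColI_eq n t ht]
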